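-- pv_equiv track=rewrite | github.com/wawzysys/Algorithm | 比赛/lqb模拟赛/10.py | solve
-- ===== SOURCE A (Python) =====
-- class Position:
--     def __init__(self, r=0, c=0, direction=0):
--         self.r = r  # 行坐标
--         self.c = c  # 列坐标
--         self.direction = direction  # 0:北, 1:东, 2:南, 3:西
--
--     def __eq__(self, other):
--         return self.r == other.r and self.c == other.c
--
--     def __hash__(self):
--         return hash((self.r, self.c))
--
-- def move(pos, action):
--     new_pos = Position(pos.r, pos.c, pos.direction)
--
--     if action == 'L':
--         new_pos.direction = (pos.direction - 1) % 4
--     elif action == 'R':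
--         new_pos.direction = (pos.direction + 1) % 4
--
--     # 根据最终朝向移动
--     if new_pos.direction == 0:  # 北
--         new_pos.r -= 1
--     elif new_pos.direction == 1:  # 东
--         new_pos.c += 1
--     elif new_pos.direction == 2:  # 南
--         new_pos.r += 1
--     else:  # 西
--         new_pos.c -= 1
--
--     return new_pos
--
-- def solve(n, path):
--     # 存储所有可能的终点位置
--     final_positions = set()
--
--     # 计算原始路径的终点
--     original_pos = Position()
--     positions = [original_pos]
--
--     # 记录原始路径上的所有位置
--     for action in path:
--         original_pos = move(original_pos, action)
--         positions.append(original_pos)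
--
--     # 对每一步尝试改变动作
--     for i in range(n):
--         pos = positions[i]  # 获取改变前的位置
--
--         # 尝试三种可能的动作
--         for new_action in ['F', 'L', 'R']:
--             if new_action == path[i]:
--                 continue
--
--             # 从改变点开始重新计算路径
--             current_pos = move(pos, new_action)
--
--             # 继续执行剩余的原始路径
--             for j in range(i + 1, n):
--                 current_pos = move(current_pos, path[j])
--
--             # 记录终点位置
--             final_positions.add((current_pos.r, current_pos.c))
--
--     return len(final_positions)
-- ===== SOURCE B (Python) =====
-- def solve(n, path):
--     # O(len) suffix-transform method: precompute for each suffix its rigid-motion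
--     # effect (displacement relative to heading 0 + net turn), then each changed
--     # step's endpoint is one rotation + translation, O(1) per candidate.
--     p = path[:n] if n >= 0 else path  # only the first n actions matter; n<0 -> answer 0 anyway
--     STEP = ((-1, 0), (0, 1), (1, 0), (0, -1))
--
--     def turn(a):
--         return -1 if a == 'L' else (1 if a == 'R' else 0)
--
--     def rot(d, v):
--         d %= 4
--         r, c = v
--         if d == 0:
--             return (r, c)
--         if d == 1:
--             return (c, -r)
--         if d == 2:
--             return (-r, -c)
--         return (-c, r)
--
--     # prefix states: position and heading before each step
--     states = [(0, 0, 0)]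
--     r = c = d = 0
--     for a in p:
--         d = (d + turn(a)) % 4
--         sr, sc = STEP[d]
--         r += sr
--         c += sc
--         states.append((r, c, d))
--
--     # suffix transforms built back-to-front: suf[j] describes executing p[j:]
--     # starting with heading 0: (row displacement, col displacement, net turn)
--     m = len(p)
--     suf = [(0, 0, 0)] * (m + 1)
--     for j in range(m - 1, -1, -1):
--         t = turn(p[j])
--         d0 = t % 4
--         vr, vc, dd = suf[j + 1]
--         sr, sc = STEP[d0]
--         wr, wc = rot(d0, (vr, vc))
--         suf[j] = (sr + wr, sc + wc, t + dd)
--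
--     ends = set()
--     for i in range(n):
--         r, c, d = states[i]
--         for na in ('F', 'L', 'R'):
--             if na == p[i]:
--                 continue
--             nd = (d + turn(na)) % 4
--             sr, sc = STEP[nd]
--             vr, vc, _ = suf[i + 1]
--             wr, wc = rot(nd, (vr, vc))
--             ends.add((r + sr + wr, c + sc + wc))
--     return len(ends)
-- ===== Notes on version B (the rewrite author's own statement) =====
-- stated objective: faster
-- what changed: Replaces the O(n^2) per-change replay of the remaining path by a single back-to-front precomputation of suffix rigid-motion transforms (displacement relative to heading 0 plus net turn), so each of the 2n changed-step endpoints is obtained by one rotation and translation in O(1).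
import Mathlib
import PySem

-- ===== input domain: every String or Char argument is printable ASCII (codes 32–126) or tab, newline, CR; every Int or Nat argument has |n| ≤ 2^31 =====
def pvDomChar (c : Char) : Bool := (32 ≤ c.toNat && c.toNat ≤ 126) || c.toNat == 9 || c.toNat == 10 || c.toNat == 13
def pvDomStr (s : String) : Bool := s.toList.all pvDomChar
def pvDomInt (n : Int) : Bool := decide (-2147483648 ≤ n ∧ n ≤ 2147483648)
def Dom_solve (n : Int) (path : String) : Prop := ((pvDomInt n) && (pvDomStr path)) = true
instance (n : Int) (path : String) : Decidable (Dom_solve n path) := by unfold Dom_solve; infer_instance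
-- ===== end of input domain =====

-- B replaces A's O(n^2) per-change replay by O(n) precomputed suffix rigid-motion
-- transforms (displacement relative to heading 0 + net turn), applied in O(1) per change.

-- ===== PORT A =====
-- state is (r, c, direction); move = A's `move`
def moveA : Int × Int × Int → Char → Int × Int × Int
  | (r, c, dir), a =>
    let d := if a = 'L' then PySem.Int.mod (dir - 1) 4
             else if a = 'R' then PySem.Int.mod (dir + 1) 4
             else dir
    if d = 0 then (r - 1, c, d)
    else if d = 1 then (r, c + 1, d)
    else if d = 2 then (r + 1, c, d)
    else (r, c - 1, d)

-- the `positions` list A builds: start state followed by the state after each action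
def positionsA : Int × Int × Int → List Char → List (Int × Int × Int)
  | s, [] => [s]
  | s, a :: rest => s :: positionsA (moveA s a) rest

def solve (n : Int) (path : String) : Int :=
  let chars := path.toList
  let positions := positionsA (0, 0, 0) chars
  let finals : PySem.Set (Int × Int) :=
    (PySem.List.pyRange 0 n 1).foldl (fun fs i =>
      let pos := PySem.List.pyGetD positions i (0, 0, 0)
      ['F', 'L', 'R'].foldl (fun fs na =>
        if na = PySem.List.pyGetD chars i 'F' then fs
        else
          let cur := (PySem.List.pyRange (i + 1) n 1).foldl
            (fun cp j => moveA cp (PySem.List.pyGetD chars j 'F')) (moveA pos na)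
          PySem.Set.add fs (cur.1, cur.2.1)) fs)
      PySem.Set.empty
  PySem.Set.len finals

-- ===== PORT B =====
def turnB (a : Char) : Int := if a = 'L' then -1 else if a = 'R' then 1 else 0

def stepB (d : Int) : Int × Int :=
  if d = 0 then (-1, 0) else if d = 1 then (0, 1) else if d = 2 then (1, 0) else (0, -1)

def rotB (d : Int) (v : Int × Int) : Int × Int :=
  let d4 := PySem.Int.mod d 4
  if d4 = 0 then v
  else if d4 = 1 then (v.2, -v.1)
  else if d4 = 2 then (-v.1, -v.2)
  else (-v.2, v.1)

-- B's prefix `states` list (position and heading before each step)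
def statesB : Int × Int × Int → List Char → List (Int × Int × Int)
  | s, [] => [s]
  | (r, c, d), a :: rest =>
    let d' := PySem.Int.mod (d + turnB a) 4
    let st := stepB d'
    (r, c, d) :: statesB (r + st.1, c + st.2, d') rest

-- B's suffix-transform table, built back-to-front: entry j describes executing p[j:]
-- from heading 0: (row displacement, col displacement, net turn)
def sufB : List Char → List (Int × Int × Int)
  | [] => [(0, 0, 0)]
  | a :: rest =>
    let s := sufB rest
    let v := s.headI
    let t := turnB a
    let d0 := PySem.Int.mod t 4
    let st := stepB d0
    let w := rotB d0 (v.1, v.2.1)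
    (st.1 + w.1, st.2 + w.2, t + v.2.2) :: s

def solve_alt (n : Int) (path : String) : Int :=
  let p := if 0 ≤ n then PySem.List.slice path.toList none (some n) else path.toList
  let states := statesB (0, 0, 0) p
  let suf := sufB p
  let ends : PySem.Set (Int × Int) :=
    (PySem.List.pyRange 0 n 1).foldl (fun es i =>
      let st := PySem.List.pyGetD states i (0, 0, 0)
      ['F', 'L', 'R'].foldl (fun es na =>
        if na = PySem.List.pyGetD p i 'F' then es
        else
          let nd := PySem.Int.mod (st.2.2 + turnB na) 4
          let sp := stepB nd
          let v := PySem.List.pyGetD suf (i + 1) (0, 0, 0)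
          let w := rotB nd (v.1, v.2.1)
          PySem.Set.add es (st.1 + sp.1 + w.1, st.2.1 + sp.2 + w.2)) es)
      PySem.Set.empty
  PySem.Set.len ends

-- ===== PRECONDITION & SPEC =====
-- Pre_ excludes exactly n > len(path), where A raises IndexError at path[i].
def Pre_solve (n : Int) (path : String) : Prop := n ≤ PySem.Str.len path
instance (n : Int) (path : String) : Decidable (Pre_solve n path) := by unfold Pre_solve; infer_instance
def pvWitness_solve : Int × String := (3, "FLR")

def Spec_solve (n : Int) (path : String) (out : Int) : Prop := out = solve_alt n path
instance (n : Int) (path : String) (out : Int) : Decidable (Spec_solve n path out) := by unfold Spec_solve; infer_instance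

-- ===== CLAIM (what is proved, stated in full; the proofs are below) =====
def Claim_equal_solve : Prop := ∀ (n : Int) (path : String), Dom_solve n path → Pre_solve n path → Spec_solve n path (solve n path)

-- ===== LEMMAS AND PROOFS =====

lemma pmod4 (a : Int) : PySem.Int.mod a 4 = a % 4 :=
  PySem.Int.mod_eq_emod_of_pos (by norm_num)

lemma emod4_cases (a : Int) : a % 4 = 0 ∨ a % 4 = 1 ∨ a % 4 = 2 ∨ a % 4 = 3 := by omega

lemma rotB_cases (d : Int) (v : Int × Int) :
    rotB d v = if d % 4 = 0 then v
               else if d % 4 = 1 then (v.2, -v.1)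
               else if d % 4 = 2 then (-v.1, -v.2)
               else (-v.2, v.1) := by
  unfold rotB; rw [pmod4]

lemma rot_zero_vec (d : Int) : rotB d (0, 0) = (0, 0) := by
  rw [rotB_cases]; split_ifs <;> simp

lemma rot_congr {a b : Int} (h : a % 4 = b % 4) (v : Int × Int) : rotB a v = rotB b v := by
  rw [rotB_cases, rotB_cases, h]

lemma rot_add_arg (d : Int) (u v : Int × Int) :
    rotB d (u.1 + v.1, u.2 + v.2)
      = ((rotB d u).1 + (rotB d v).1, (rotB d u).2 + (rotB d v).2) := by
  rw [rotB_cases, rotB_cases, rotB_cases]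
  split_ifs <;> simp [Prod.ext_iff] <;> omega

lemma rot_rot (a b : Int) (v : Int × Int) : rotB a (rotB b v) = rotB (a + b) v := by
  rw [rotB_cases, rotB_cases, rotB_cases]
  have hab : (a + b) % 4 = (a % 4 + b % 4) % 4 := by omega
  rcases emod4_cases a with ha | ha | ha | ha <;>
    rcases emod4_cases b with hb | hb | hb | hb <;>
      rw [ha, hb] at hab <;> norm_num at hab <;> simp [ha, hb, hab]

lemma rot_step (a b : Int) : rotB a (stepB (b % 4)) = stepB ((a + b) % 4) := by
  rw [rotB_cases]
  have hab : (a + b) % 4 = (a % 4 + b % 4) % 4 := by omega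
  rcases emod4_cases a with ha | ha | ha | ha <;>
    rcases emod4_cases b with hb | hb | hb | hb <;>
      rw [ha, hb] at hab <;> norm_num at hab <;> simp [stepB, ha, hb, hab]

lemma step_norm (r c d' : Int) :
    (if d' = 0 then (r - 1, c, d')
     else if d' = 1 then (r, c + 1, d')
     else if d' = 2 then (r + 1, c, d')
     else (r, c - 1, d'))
      = (r + (stepB d').1, c + (stepB d').2, d') := by
  unfold stepB; split_ifs <;> simp [Prod.ext_iff] <;> omega

lemma moveA_norm (r c d : Int) (a : Char) (h0 : 0 ≤ d) (h1 : d < 4) :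
    moveA (r, c, d) a =
      (r + (stepB ((d + turnB a) % 4)).1,
       c + (stepB ((d + turnB a) % 4)).2,
       (d + turnB a) % 4) := by
  by_cases hL : a = 'L'
  · have hteq : (d - 1) % 4 = (d + turnB a) % 4 := by simp [turnB, hL]; omega
    simp only [moveA, if_pos hL, pmod4, hteq]
    exact step_norm r c ((d + turnB a) % 4)
  · by_cases hR : a = 'R'
    · have hteq : (d + 1) % 4 = (d + turnB a) % 4 := by simp [turnB, hR, hL]
      simp only [moveA, if_neg hL, if_pos hR, pmod4, hteq]
      exact step_norm r c ((d + turnB a) % 4)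
    · have hteq : (d + turnB a) % 4 = d := by simp [turnB, hL, hR]; omega
      simp only [moveA, if_neg hL, if_neg hR]
      rw [hteq]
      exact step_norm r c d

def sufHead (s : List Char) : Int × Int × Int := (sufB s).headI

lemma sufHead_nil : sufHead [] = (0, 0, 0) := rfl

lemma sufHead_cons (a : Char) (rest : List Char) :
    sufHead (a :: rest) =
      ((stepB (turnB a % 4)).1 + (rotB (turnB a % 4) ((sufHead rest).1, (sufHead rest).2.1)).1,
       (stepB (turnB a % 4)).2 + (rotB (turnB a % 4) ((sufHead rest).1, (sufHead rest).2.1)).2,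
       turnB a + (sufHead rest).2.2) := by
  show (sufB (a :: rest)).headI = _
  simp only [sufB, List.headI, pmod4]
  rfl

lemma replay_eq (s : List Char) : ∀ r c d : Int, 0 ≤ d → d < 4 →
    s.foldl moveA (r, c, d) =
      (r + (rotB d ((sufHead s).1, (sufHead s).2.1)).1,
       c + (rotB d ((sufHead s).1, (sufHead s).2.1)).2,
       (d + (sufHead s).2.2) % 4) := by
  induction s with
  | nil =>
    intro r c d h0 h1
    simp [sufHead_nil, rot_zero_vec]
    omega
  | cons a rest ih =>
    intro r c d h0 h1
    have hmod0 : 0 ≤ (d + turnB a) % 4 := Int.emod_nonneg _ (by norm_num)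
    have hmod1 : (d + turnB a) % 4 < 4 := Int.emod_lt_of_pos _ (by norm_num)
    rw [List.foldl_cons, moveA_norm r c d a h0 h1, ih _ _ _ hmod0 hmod1, sufHead_cons]
    rw [rot_add_arg d (stepB (turnB a % 4))
          (rotB (turnB a % 4) ((sufHead rest).1, (sufHead rest).2.1)),
        rot_step d (turnB a),
        rot_rot d (turnB a % 4) ((sufHead rest).1, (sufHead rest).2.1),
        rot_congr (show (d + turnB a % 4) % 4 = (d + turnB a) % 4 by omega),
        rot_congr (show ((d + turnB a) % 4) % 4 = (d + turnB a) % 4 by omega) (v := ((sufHead rest).1, (sufHead rest).2.1))]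
    refine Prod.ext ?_ (Prod.ext ?_ ?_) <;> simp <;> first | ring | omega

lemma length_positionsA (l : List Char) : ∀ s, (positionsA s l).length = l.length + 1 := by
  induction l with
  | nil => intro s; rfl
  | cons a rest ih => intro s; simp [positionsA, ih]

lemma positionsA_getD (l : List Char) : ∀ (k : Nat) (s : Int × Int × Int), k ≤ l.length →
    (positionsA s l).getD k (0, 0, 0) = (l.take k).foldl moveA s := by
  induction l with
  | nil =>
    intro k s hk
    have hk0 : k = 0 := by simpa using hk
    subst hk0; rfl
  | cons a rest ih =>
    intro k s hk
    cases k with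
    | zero => rfl
    | succ m =>
      simp only [positionsA, List.getD_cons_succ, List.take_succ_cons, List.foldl_cons]
      exact ih m _ (by simpa using hk)

lemma statesB_eq (l : List Char) : ∀ r c d : Int, 0 ≤ d → d < 4 →
    statesB (r, c, d) l = positionsA (r, c, d) l := by
  induction l with
  | nil => intro r c d _ _; rfl
  | cons a rest ih =>
    intro r c d h0 h1
    have hmod0 : 0 ≤ (d + turnB a) % 4 := Int.emod_nonneg _ (by norm_num)
    have hmod1 : (d + turnB a) % 4 < 4 := Int.emod_lt_of_pos _ (by norm_num)
    simp only [statesB, positionsA, pmod4]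
    rw [moveA_norm r c d a h0 h1]
    exact congrArg _ (ih _ _ _ hmod0 hmod1)

lemma length_sufB (l : List Char) : (sufB l).length = l.length + 1 := by
  induction l with
  | nil => rfl
  | cons a rest ih => simp [sufB, ih]

lemma sufB_getD (l : List Char) : ∀ k : Nat, k ≤ l.length →
    (sufB l).getD k (0, 0, 0) = sufHead (l.drop k) := by
  induction l with
  | nil =>
    intro k hk
    have hk0 : k = 0 := by simpa using hk
    subst hk0; rfl
  | cons a rest ih =>
    intro k hk
    cases k with
    | zero => rfl
    | succ m =>
      simp only [sufB, List.getD_cons_succ, List.drop_succ_cons]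
      exact ih m (by simpa using hk)

lemma prefix_state_norm (l : List Char) :
    0 ≤ (l.foldl moveA (0, 0, 0)).2.2 ∧ (l.foldl moveA (0, 0, 0)).2.2 < 4 := by
  rw [replay_eq l 0 0 0 le_rfl (by norm_num)]
  exact ⟨Int.emod_nonneg _ (by norm_num), Int.emod_lt_of_pos _ (by norm_num)⟩

lemma pvSliceTo (xs : List Char) (b : Int) (_hb : 0 ≤ b) :
    PySem.List.slice xs none (some b) = xs.take b.toNat := by
  have hb' : ((b.toNat : Int)) = b := by omega
  rw [← hb', PySem.List.slice_to_natCast, Int.toNat_natCast]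

lemma replay_index (p : List Char) (a b : Int) (init : Int × Int × Int)
    (h0 : 0 ≤ a) (hb : b = (p.length : Int)) :
    (PySem.List.pyRange a b 1).foldl
        (fun cp j => moveA cp (PySem.List.pyGetD p j 'F')) init
      = (p.drop a.toNat).foldl moveA init := by
  subst hb
  rw [← PySem.List.len_eq]
  exact PySem.List.foldl_pyRange_pyGetD p 'F' moveA init h0

-- ===== VERDICT (by name: the statement is the Claim_ definition above) =====
theorem solve_spec : Claim_equal_solve := by
  intro n path _ hpre
  unfold Spec_solve
  have hlen : n ≤ (path.toList.length : Int) := by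
    simpa [PySem.Str.len_eq] using hpre
  by_cases hn : 0 < n
  case neg =>
    unfold solve solve_alt
    rw [PySem.List.pyRange_one_eq_nil (by omega)]
    rfl
  case pos =>
    have h0n : (0 : Int) ≤ n := le_of_lt hn
    have hslice : PySem.List.slice path.toList none (some n) = path.toList.take n.toNat :=
      pvSliceTo path.toList n h0n
    simp only [solve, solve_alt, if_pos h0n, hslice]
    rw [statesB_eq (path.toList.take n.toNat) 0 0 0 le_rfl (by norm_num)]
    refine congrArg PySem.Set.len (PySem.List.foldl_congr_mem _ _ _ _ ?_)
    intro fs i hi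
    obtain ⟨hi0, hin⟩ := PySem.List.mem_pyRange_one.mp hi
    have hplen : (path.toList.take n.toNat).length = n.toNat := by
      rw [List.length_take]; omega
    have hpos : PySem.List.pyGetD (positionsA (0, 0, 0) path.toList) i (0, 0, 0)
        = (path.toList.take i.toNat).foldl moveA (0, 0, 0) := by
      rw [PySem.List.pyGetD_eq_getElem _ _ hi0 (by rw [length_positionsA]; omega),
          ← List.getD_eq_getElem _ (0, 0, 0) (by rw [length_positionsA]; omega),
          positionsA_getD _ _ _ (by omega)]
    have hst : PySem.List.pyGetD (positionsA (0, 0, 0) (path.toList.take n.toNat)) i (0, 0, 0)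
        = (path.toList.take i.toNat).foldl moveA (0, 0, 0) := by
      rw [PySem.List.pyGetD_eq_getElem _ _ hi0 (by rw [length_positionsA, hplen]; omega),
          ← List.getD_eq_getElem _ (0, 0, 0) (by rw [length_positionsA, hplen]; omega),
          positionsA_getD _ _ _ (by rw [hplen]; omega),
          List.take_take, min_eq_left (by omega)]
    have hchar : PySem.List.pyGetD (path.toList.take n.toNat) i 'F'
        = PySem.List.pyGetD path.toList i 'F' := by
      rw [PySem.List.pyGetD_eq_getElem _ _ hi0 (by rw [hplen]; omega),
          PySem.List.pyGetD_eq_getElem _ _ hi0 (by omega)]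
      simp [List.getElem_take]
    rw [hpos, hst, hchar]
    refine PySem.List.foldl_congr_mem _ _ _ _ ?_
    intro es na hna
    by_cases hc : na = PySem.List.pyGetD path.toList i 'F'
    · simp [hc]
    · simp only [if_neg hc]
      congr 1
      have hjcong : ∀ (cp : Int × Int × Int), ∀ j ∈ PySem.List.pyRange (i + 1) n 1,
          moveA cp (PySem.List.pyGetD path.toList j 'F')
            = moveA cp (PySem.List.pyGetD (path.toList.take n.toNat) j 'F') := by
        intro cp j hj
        obtain ⟨hj1, hj2⟩ := PySem.List.mem_pyRange_one.mp hj
        congr 1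
        rw [PySem.List.pyGetD_eq_getElem _ _ (by omega) (by omega),
            PySem.List.pyGetD_eq_getElem _ _ (by omega) (by rw [hplen]; omega)]
        simp [List.getElem_take]
      rw [PySem.List.foldl_congr_mem _ _ _ _ hjcong,
          replay_index (path.toList.take n.toNat) (i + 1) n _ (by omega)
            (by rw [hplen]; omega)]
      obtain ⟨q, hq3⟩ : ∃ t, (path.toList.take i.toNat).foldl moveA (0, 0, 0) = t := ⟨_, rfl⟩
      have hq := prefix_state_norm (path.toList.take i.toNat)
      rw [hq3] at hq
      obtain ⟨r, c, d⟩ := q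
      rw [hq3]
      rw [moveA_norm r c d na hq.1 hq.2]
      have hnd0 : 0 ≤ (d + turnB na) % 4 := Int.emod_nonneg _ (by norm_num)
      have hnd1 : (d + turnB na) % 4 < 4 := Int.emod_lt_of_pos _ (by norm_num)
      rw [replay_eq ((path.toList.take n.toNat).drop (i + 1).toNat) _ _ _ hnd0 hnd1]
      have hsuf : PySem.List.pyGetD (sufB (path.toList.take n.toNat)) (i + 1) (0, 0, 0)
          = sufHead ((path.toList.take n.toNat).drop (i + 1).toNat) := by
        rw [PySem.List.pyGetD_eq_getElem _ _ (by omega) (by rw [length_sufB, hplen]; omega),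
            ← List.getD_eq_getElem _ (0, 0, 0) (by rw [length_sufB, hplen]; omega),
            sufB_getD _ _ (by rw [hplen]; omega)]
      rw [hsuf]
      simp only [pmod4]
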